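-- pv_equiv track=rewrite | github.com/ucare-uchicago/mlec-sim | src/helpers/sodp/position.py | invert_stripeset_disk
-- ===== SOURCE A (Python) =====
-- def invert_stripeset_disk(stripesets):
--     disks_to_stripes_map = {}
--     disks_to_stripesets_map = {}
--     for ss_idx in range(len(stripesets)):
--         for diskId in stripesets[ss_idx]:
--             curr_list = disks_to_stripes_map.get(diskId, [])
--             curr_list.append(ss_idx)
--             disks_to_stripes_map[diskId] = curr_list
--
--             curr_list = disks_to_stripesets_map.get(diskId, set())
--             curr_list.add(tuple(stripesets[ss_idx]))
--             disks_to_stripesets_map[diskId] = curr_list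
--
--     return disks_to_stripes_map, disks_to_stripesets_map
-- ===== SOURCE B (Python) =====
-- def invert_stripeset_disk(stripesets):
--     # Pass 1: only the disk -> stripe-indices map.
--     disks_to_stripes_map = {}
--     for ss_idx, ss in enumerate(stripesets):
--         for diskId in ss:
--             disks_to_stripes_map.setdefault(diskId, []).append(ss_idx)
--     # Pass 2: derive the disk -> stripeset-set map from the index map.
--     disks_to_stripesets_map = {
--         diskId: {tuple(stripesets[ss]) for ss in ss_list}
--         for diskId, ss_list in disks_to_stripes_map.items()
--     }
--     return disks_to_stripes_map, disks_to_stripesets_map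
-- ===== Notes on version B (the rewrite author's own statement) =====
-- stated objective: simpler
-- what changed: B builds only the disk->stripe-index map in a single pass and then derives the disk->stripeset-set map from that map's entries, instead of A's fused loop that maintains both dictionaries together.
import Mathlib
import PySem

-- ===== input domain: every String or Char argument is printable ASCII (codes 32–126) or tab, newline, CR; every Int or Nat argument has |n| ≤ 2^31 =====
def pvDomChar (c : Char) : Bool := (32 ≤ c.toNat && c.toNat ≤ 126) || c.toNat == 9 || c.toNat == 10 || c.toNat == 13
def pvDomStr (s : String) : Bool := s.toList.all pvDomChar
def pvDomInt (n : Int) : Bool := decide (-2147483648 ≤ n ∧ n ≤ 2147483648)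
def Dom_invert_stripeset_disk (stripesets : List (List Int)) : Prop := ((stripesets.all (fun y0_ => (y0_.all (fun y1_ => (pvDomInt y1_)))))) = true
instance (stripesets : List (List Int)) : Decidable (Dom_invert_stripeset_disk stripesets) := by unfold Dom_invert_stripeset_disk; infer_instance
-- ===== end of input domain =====

-- B builds the disk->stripe-index map alone, then derives the disk->stripeset-set map
-- from its entries instead of maintaining both dictionaries in one fused loop (simpler decomposition).


-- ===== PORT A =====
-- fused loop: both dicts updated together for every diskId of every stripeset
def invert_stripeset_disk (stripesets : List (List Int)) : (List (Int × List Int)) × (List (Int × List (List Int))) :=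
  let res := (PySem.List.pyRange 0 (PySem.List.len stripesets) 1).foldl
    (fun (st : PySem.Dict Int (List Int) × PySem.Dict Int (PySem.Set (List Int))) ss_idx =>
      (PySem.List.pyGetD stripesets ss_idx []).foldl
        (fun st diskId =>
          (st.1.insert diskId (st.1.getD diskId [] ++ [ss_idx]),
           st.2.insert diskId (PySem.Set.add (st.2.getD diskId PySem.Set.empty)
             (PySem.List.pyGetD stripesets ss_idx []))))
        st)
    ((PySem.Dict.empty : PySem.Dict Int (List Int)),
     (PySem.Dict.empty : PySem.Dict Int (PySem.Set (List Int))))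
  (res.1.items, res.2.items)

-- ===== PORT B =====
-- pass 1: only the index map; pass 2: the stripeset-set map derived from pass 1's items
def invert_stripeset_disk_alt (stripesets : List (List Int)) : (List (Int × List Int)) × (List (Int × List (List Int))) :=
  let d1 := (PySem.List.enumerate stripesets 0).foldl
    (fun (d : PySem.Dict Int (List Int)) p =>
      p.2.foldl (fun d diskId => d.modify diskId [] (· ++ [p.1])) d)
    PySem.Dict.empty
  (d1.items,
   d1.items.map (fun p =>
     (p.1, PySem.Set.ofList (p.2.map (fun ss => PySem.List.pyGetD stripesets ss [])))))

-- ===== PRECONDITION & SPEC =====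
def Spec_invert_stripeset_disk (stripesets : List (List Int)) (out : (List (Int × List Int)) × (List (Int × List (List Int)))) : Prop := out = invert_stripeset_disk_alt stripesets
instance (stripesets : List (List Int)) (out : (List (Int × List Int)) × (List (Int × List (List Int)))) : Decidable (Spec_invert_stripeset_disk stripesets out) := by unfold Spec_invert_stripeset_disk; infer_instance

-- ===== CLAIM (what is proved, stated in full; the proofs are below) =====
def Claim_equal_invert_stripeset_disk : Prop := ∀ (stripesets : List (List Int)), Dom_invert_stripeset_disk stripesets → Spec_invert_stripeset_disk stripesets (invert_stripeset_disk stripesets)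

-- ===== LEMMAS AND PROOFS =====

-- the value map relating A's second dict to its first: stripe-index list ↦ set of rows
def invG (f : Int → List Int) : Int × List Int → Int × PySem.Set (List Int) :=
  fun p => (p.1, PySem.Set.ofList (p.2.map f))

lemma keys_of_items_map (f : Int → List Int)
    (d1 : PySem.Dict Int (List Int)) (d2 : PySem.Dict Int (PySem.Set (List Int)))
    (h2 : d2.items = d1.items.map (invG f)) : d2.keys = d1.keys := by
  simp only [PySem.Dict.keys, h2, List.map_map]
  rfl

lemma step_items (f : Int → List Int) (i k : Int)
    (d1 : PySem.Dict Int (List Int)) (d2 : PySem.Dict Int (PySem.Set (List Int)))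
    (h1 : d1.keys.Nodup) (h2 : d2.items = d1.items.map (invG f)) :
    (d2.insert k (PySem.Set.add (d2.getD k PySem.Set.empty) (f i))).items
      = (d1.insert k (d1.getD k [] ++ [i])).items.map (invG f) := by
  have hkeys : d2.keys = d1.keys := keys_of_items_map f d1 d2 h2
  have hc : d2.contains k = d1.contains k := by
    rw [PySem.Dict.contains_eq_decide_mem_keys, PySem.Dict.contains_eq_decide_mem_keys, hkeys]
  by_cases hck : d1.contains k = true
  · obtain ⟨v, hv⟩ : ∃ v, d1.get? k = some v := by
      have := PySem.Dict.contains_eq_isSome_get? (d := d1) (k := k)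
      rw [hck] at this
      exact Option.isSome_iff_exists.mp this.symm
    have hvD : d1.getD k [] = v := PySem.Dict.getD_of_get?_eq_some _ _ hv
    have hmem : (k, v) ∈ d1.items := PySem.Dict.mem_items_of_get?_eq_some _ hv
    have hmem2 : (k, PySem.Set.ofList (v.map f)) ∈ d2.items := by
      rw [h2]; exact List.mem_map_of_mem hmem
    have hnd2 : d2.keys.Nodup := hkeys ▸ h1
    have hd2 : d2.getD k PySem.Set.empty = PySem.Set.ofList (v.map f) :=
      PySem.Dict.getD_of_mem_items _ hmem2 hnd2 _
    rw [PySem.Dict.items_insert_of_contains _ _ (hc.trans hck),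
        PySem.Dict.items_insert_of_contains _ _ hck, h2, List.map_map, List.map_map]
    refine List.map_congr_left ?_
    intro p _
    by_cases hpk : p.1 = k
    · simp only [Function.comp, invG, hpk, beq_self_eq_true, if_pos, hd2, hvD]
      simp [PySem.Set.ofList_append_singleton]
    · simp [Function.comp, invG, hpk]
  · have hck' : d1.contains k = false := by simpa using hck
    have hc2 : d2.contains k = false := hc.trans hck'
    have hvD : d1.getD k [] = [] := PySem.Dict.getD_of_not_contains _ _ hck'
    have hd2 : d2.getD k PySem.Set.empty = PySem.Set.empty :=
      PySem.Dict.getD_of_not_contains _ _ hc2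
    rw [PySem.Dict.items_insert_of_not_contains _ _ hc2,
        PySem.Dict.items_insert_of_not_contains _ _ hck', h2, List.map_append, hvD, hd2]
    rfl

-- the inner loop (one stripeset) preserves the invariant and projects to B's inner loop
lemma inner_fold (f : Int → List Int) (i : Int) (r : List Int) :
    ∀ (d1 : PySem.Dict Int (List Int)) (d2 : PySem.Dict Int (PySem.Set (List Int))),
      d1.keys.Nodup → d2.items = d1.items.map (invG f) →
      (let res := r.foldl
        (fun (st : PySem.Dict Int (List Int) × PySem.Dict Int (PySem.Set (List Int))) k =>
          (st.1.insert k (st.1.getD k [] ++ [i]),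
           st.2.insert k (PySem.Set.add (st.2.getD k PySem.Set.empty) (f i)))) (d1, d2)
       res.1 = r.foldl (fun d k => d.insert k (d.getD k [] ++ [i])) d1
         ∧ res.1.keys.Nodup ∧ res.2.items = res.1.items.map (invG f)) := by
  induction r with
  | nil => intro d1 d2 h1 h2; exact ⟨rfl, h1, h2⟩
  | cons k r ih =>
    intro d1 d2 h1 h2
    simp only [List.foldl_cons]
    exact ih _ _ (PySem.Dict.nodup_keys_insert _ _ _ h1) (step_items f i k d1 d2 h1 h2)

-- the outer loop over all stripe indices
lemma outer_fold (f : Int → List Int) (L : List Int) :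
    ∀ (d1 : PySem.Dict Int (List Int)) (d2 : PySem.Dict Int (PySem.Set (List Int))),
      d1.keys.Nodup → d2.items = d1.items.map (invG f) →
      (let res := L.foldl
        (fun (st : PySem.Dict Int (List Int) × PySem.Dict Int (PySem.Set (List Int))) i =>
          (f i).foldl
            (fun st k =>
              (st.1.insert k (st.1.getD k [] ++ [i]),
               st.2.insert k (PySem.Set.add (st.2.getD k PySem.Set.empty) (f i)))) st) (d1, d2)
       res.1 = L.foldl (fun d i => (f i).foldl (fun d k => d.insert k (d.getD k [] ++ [i])) d) d1
         ∧ res.1.keys.Nodup ∧ res.2.items = res.1.items.map (invG f)) := by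
  induction L with
  | nil => intro d1 d2 h1 h2; exact ⟨rfl, h1, h2⟩
  | cons i L ih =>
    intro d1 d2 h1 h2
    simp only [List.foldl_cons]
    obtain ⟨he, hn, hr⟩ := inner_fold f i (f i) d1 d2 h1 h2
    obtain ⟨he', hn', hr'⟩ := ih _ _ hn hr
    refine ⟨?_, hn', hr'⟩
    rw [he', he]

-- ===== VERDICT (by name: the statement is the Claim_ definition above) =====
theorem invert_stripeset_disk_spec : Claim_equal_invert_stripeset_disk := by
  intro stripesets _
  unfold Spec_invert_stripeset_disk invert_stripeset_disk invert_stripeset_disk_alt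
  set f : Int → List Int := fun i => PySem.List.pyGetD stripesets i [] with hf
  obtain ⟨he, _, hr⟩ := outer_fold f (PySem.List.pyRange 0 (PySem.List.len stripesets) 1)
    PySem.Dict.empty PySem.Dict.empty PySem.Dict.nodup_keys_empty rfl
  simp only at he hr ⊢
  rw [hr, he]
  have hB : (PySem.List.enumerate stripesets 0).foldl
      (fun (d : PySem.Dict Int (List Int)) p =>
        p.2.foldl (fun d diskId => d.modify diskId [] (· ++ [p.1])) d)
      PySem.Dict.empty
      = (PySem.List.pyRange 0 (PySem.List.len stripesets) 1).foldl
          (fun d i => (f i).foldl (fun d k => d.insert k (d.getD k [] ++ [i])) d)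
          PySem.Dict.empty := by
    rw [PySem.List.enumerate_eq_map_pyRange stripesets ([] : List Int), List.foldl_map]
    rfl
  rw [hB]
  rfl
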